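-- pv_equiv track=rewrite | github.com/pypi-data/pypi-mirror-41 | packages/metaphor-gm/metaphor-gm-19.2.10a8.tar.gz/metaphor-gm-19.2.10a8/metaphor/chem_gm/core/atoms.py | sortatomlist
-- ===== SOURCE A (Python) =====
-- Atomes = ['C', 'N', 'O', 'F', 'Cl', 'Br', 'I', 'Si', 'S', 'P', 'Ge'] # od parser
--
-- def sortatomlist(source, candidate=Atomes):
--     """Sorting the 'source' atom list with respect to the order of a submitted list 'candidate'.
--     Erase duplicates if exist.
--     Return the sorted list and the remaining
--     Initial list remain unmodified.
--     """
--     if isinstance(candidate, int):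
--         candidate = Atomes[:candidate]
--     if isinstance(source, str):
--         source = source.split(",")
--     res = []
--     source = source[:]
--     for value in candidate:
--         if value in source:
--             res.append(source.pop(source.index(value)))
--     return res, source
-- ===== SOURCE B (Python) =====
-- Atomes = ['C', 'N', 'O', 'F', 'Cl', 'Br', 'I', 'Si', 'S', 'P', 'Ge'] # od parser
--
-- def sortatomlist(source, candidate=Atomes):
--     """Sorting the 'source' atom list with respect to the order of a submitted list 'candidate'.
--     Erase duplicates if exist.
--     Return the sorted list and the remaining
--     Initial list remain unmodified.
--     """
--     if isinstance(candidate, int):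
--         candidate = Atomes[:candidate]
--     if isinstance(source, str):
--         source = source.split(",")
--     # count occurrences in source once
--     have = {}
--     for x in source:
--         have[x] = have.get(x, 0) + 1
--     # take candidate values in candidate order, each up to its source count
--     res = []
--     want = {}
--     for v in candidate:
--         w = want.get(v, 0)
--         if w < have.get(v, 0):
--             res.append(v)
--             want[v] = w + 1
--     # remaining: drop the first want[x] occurrences of each value x
--     remaining = []
--     for x in source:
--         c = want.get(x, 0)
--         if c > 0:
--             want[x] = c - 1
--         else:
--             remaining.append(x)
--     return res, remaining
-- ===== Notes on version B (the rewrite author's own statement) =====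
-- stated objective: faster
-- what changed: Replaces the per-candidate scan/index/pop over a mutated source copy with count dictionaries: one pass counts source, one pass over candidate selects by quota, one pass over source drops the taken occurrences.
import Mathlib
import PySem

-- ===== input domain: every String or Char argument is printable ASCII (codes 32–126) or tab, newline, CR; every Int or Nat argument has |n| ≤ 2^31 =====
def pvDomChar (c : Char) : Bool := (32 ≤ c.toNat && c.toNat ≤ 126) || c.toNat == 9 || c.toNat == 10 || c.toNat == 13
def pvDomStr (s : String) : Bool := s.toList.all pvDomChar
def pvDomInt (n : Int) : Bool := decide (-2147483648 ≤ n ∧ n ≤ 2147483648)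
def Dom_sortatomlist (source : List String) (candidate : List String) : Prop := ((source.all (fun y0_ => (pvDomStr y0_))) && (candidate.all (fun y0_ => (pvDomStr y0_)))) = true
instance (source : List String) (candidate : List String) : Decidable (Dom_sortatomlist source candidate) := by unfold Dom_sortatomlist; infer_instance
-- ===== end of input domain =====

-- B replaces A's per-candidate scan/index/pop over a mutated source copy with count
-- dictionaries built once and three linear passes (objective: faster, O(n+m) vs O(n*m)).
-- The Lean signatures take list arguments, so Python A's int/str coercion guards
-- (kept verbatim in Source B) have no counterpart here.

-- ===== PORT A =====
def sortatomlist (source : List String) (candidate : List String) : List String × List String :=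
  -- res = []; source = source[:]; for value in candidate: if value in source: res.append(source.pop(source.index(value)))
  candidate.foldl
    (fun (st : List String × List String) value =>
      if st.2.contains value then
        match PySem.List.index? st.2 value with
        | some i =>
          match PySem.List.pop? st.2 (i : Int) with
          | some (x, rest) => (st.1 ++ [x], rest)
          | none => st
        | none => st
      else st)
    ([], source)

-- ===== PORT B =====
def sortatomlist_alt (source : List String) (candidate : List String) : List String × List String :=
  -- have = {}; for x in source: have[x] = have.get(x,0) + 1
  let hav : PySem.Dict String Int :=
    source.foldl (fun d x => d.insert x (d.getD x 0 + 1)) PySem.Dict.empty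
  -- res = []; want = {}; for v in candidate: w = want.get(v,0); if w < have.get(v,0): res.append(v); want[v] = w+1
  let rw := candidate.foldl
    (fun (st : List String × PySem.Dict String Int) v =>
      let w := st.2.getD v 0
      if w < hav.getD v 0 then (st.1 ++ [v], st.2.insert v (w + 1)) else st)
    ([], PySem.Dict.empty)
  -- remaining = []; for x in source: c = want.get(x,0); if c > 0: want[x] = c-1 else: remaining.append(x)
  let fin := source.foldl
    (fun (st : List String × PySem.Dict String Int) x =>
      let c := st.2.getD x 0
      if c > 0 then (st.1, st.2.insert x (c - 1)) else (st.1 ++ [x], st.2))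
    ([], rw.2)
  (rw.1, fin.1)

-- ===== PRECONDITION & SPEC =====
def Spec_sortatomlist (source : List String) (candidate : List String) (out : List String × List String) : Prop := out = sortatomlist_alt source candidate
instance (source : List String) (candidate : List String) (out : List String × List String) : Decidable (Spec_sortatomlist source candidate out) := by unfold Spec_sortatomlist; infer_instance

-- ===== CLAIM (what is proved, stated in full; the proofs are below) =====
def Claim_equal_sortatomlist : Prop := ∀ (source : List String) (candidate : List String), Dom_sortatomlist source candidate → Spec_sortatomlist source candidate (sortatomlist source candidate)

-- ===== LEMMAS AND PROOFS =====

-- pointwise update of a count function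
def updF (f : String → Int) (k : String) (v : Int) : String → Int :=
  fun y => if y = k then v else f y

-- A's loop as structural recursion over candidate
def arec : List String → List String → List String × List String
  | [], s => ([], s)
  | c :: cs, s =>
    if s.contains c then
      let p := arec cs (s.erase c)
      (c :: p.1, p.2)
    else arec cs s

-- "drop the first f x occurrences of each x" (B's third pass, state abstracted to a function)
def rcf (f : String → Int) : List String → List String
  | [] => []
  | x :: xs => if 0 < f x then rcf (updF f x (f x - 1)) xs else x :: rcf f xs

-- B's candidate pass, state abstracted to a function
def bf (hav : String → Int) : List String → (String → Int) → List String × (String → Int)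
  | [], f => ([], f)
  | c :: cs, f =>
    if f c < hav c then
      let p := bf hav cs (updF f c (f c + 1))
      (c :: p.1, p.2)
    else bf hav cs f

lemma rcf_congr (xs : List String) : ∀ (f g : String → Int), (∀ x, f x = g x) → rcf f xs = rcf g xs := by
  induction xs with
  | nil => intro f g h; rfl
  | cons x xs ih =>
    intro f g h
    simp only [rcf, h x]
    split_ifs with hx
    · exact ih _ _ (by intro y; simp [updF, h])
    · rw [ih _ _ h]

lemma rcf_zero (xs : List String) : rcf (fun _ => 0) xs = xs := by
  induction xs with
  | nil => rfl
  | cons x xs ih => simp [rcf, ih]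

-- membership in the residual list
lemma mem_rcf (c : String) (xs : List String) : ∀ (f : String → Int), (∀ x, 0 ≤ f x) →
    (c ∈ rcf f xs ↔ f c < (xs.count c : Int)) := by
  induction xs with
  | nil =>
    intro f hf
    simp only [rcf, List.not_mem_nil, List.count_nil, Nat.cast_zero, false_iff, not_lt]
    exact hf c
  | cons x xs ih =>
    intro f hf
    by_cases hx : 0 < f x
    · simp only [rcf, if_pos hx]
      rw [ih _ (fun y => by have h1 := hf y; have h2 := hf x; simp only [updF]; split_ifs <;> omega)]
      by_cases hcx : c = x
      · subst hcx
        simp only [updF, if_pos rfl, List.count_cons_self]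
        push_cast; omega
      · simp only [updF, if_neg hcx, List.count_cons_of_ne (fun h => hcx h.symm)]
    · have hfx : f x = 0 := le_antisymm (not_lt.mp hx) (hf x)
      simp only [rcf, if_neg hx, List.mem_cons]
      by_cases hcx : c = x
      · subst hcx
        simp only [List.count_cons_self, true_or, true_iff]
        push_cast; omega
      · rw [List.count_cons_of_ne (fun h => hcx h.symm), ih f hf]
        simp [hcx]

-- erasing the first still-present occurrence = bumping the quota
lemma erase_rcf (v : String) (xs : List String) : ∀ (f : String → Int), (∀ x, 0 ≤ f x) →
    f v < (xs.count v : Int) →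
    rcf (updF f v (f v + 1)) xs = (rcf f xs).erase v := by
  induction xs with
  | nil =>
    intro f hf hcnt
    exfalso; simp only [List.count_nil, Nat.cast_zero] at hcnt
    have := hf v; omega
  | cons x xs ih =>
    intro f hf hcnt
    by_cases hxv : x = v
    · subst hxv
      by_cases hx : 0 < f x
      · have h1 : 0 < updF f x (f x + 1) x := by
          simp [updF] <;> omega
        simp only [rcf, if_pos h1, if_pos hx]
        have e1 : updF (updF f x (f x + 1)) x (updF f x (f x + 1) x - 1)
            = updF (updF f x (f x - 1)) x (updF f x (f x - 1) x + 1) := by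
          funext y
          by_cases h2 : y = x
          · subst h2; simp [updF] <;> omega
          · simp only [updF, if_neg h2]
        rw [rcf_congr xs _ _ (fun y => congrFun e1 y)]
        rw [ih (updF f x (f x - 1))
          (fun y => by
            have h2 := hf y; have h3 := hf x
            simp only [updF]; split_ifs <;> omega)
          (by
            simp [updF]
            rw [List.count_cons_self] at hcnt
            push_cast at hcnt ⊢; omega)]
      · have hfx : f x = 0 := le_antisymm (not_lt.mp hx) (hf x)
        have h1 : 0 < updF f x (f x + 1) x := by
          simp [updF] <;> omega
        simp only [rcf, if_pos h1, if_neg hx]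
        have e1 : updF (updF f x (f x + 1)) x (updF f x (f x + 1) x - 1) = f := by
          funext y
          by_cases h2 : y = x
          · subst h2; simp [updF] <;> omega
          · simp only [updF, if_neg h2]
        rw [rcf_congr xs _ _ (fun y => congrFun e1 y), List.erase_cons_head]
    · have hvx : ¬ v = x := fun h => hxv h.symm
      have hne : updF f v (f v + 1) x = f x := by simp only [updF, if_neg hxv]
      by_cases hx : 0 < f x
      · simp only [rcf, hne, if_pos hx]
        have e1 : updF (updF f v (f v + 1)) x (f x - 1)
            = updF (updF f x (f x - 1)) v (updF f x (f x - 1) v + 1) := by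
          funext y
          by_cases h1 : y = x
          · subst h1; simp only [updF, if_pos rfl, if_neg hxv]
          · by_cases h2 : y = v
            · subst h2; simp only [updF, if_pos rfl, if_neg h1, if_neg hvx]
            · simp only [updF, if_neg h1, if_neg h2]
        rw [rcf_congr xs _ _ (fun y => congrFun e1 y)]
        rw [ih (updF f x (f x - 1))
          (fun y => by
            have h2 := hf y; have h3 := hf x
            simp only [updF]; split_ifs <;> omega)
          (by
            simp only [updF, if_neg hvx]
            rwa [List.count_cons_of_ne hxv] at hcnt)]
      · simp only [rcf, hne, if_neg hx]
        rw [ih f hf (by rwa [List.count_cons_of_ne hxv] at hcnt)]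
        rw [List.erase_cons_tail (by simp [hxv])]

-- THE CORE: A's recursion on the residual list = B's quota pass + B's drop pass
lemma arec_eq_bf (xs : List String) (cs : List String) : ∀ (f : String → Int), (∀ x, 0 ≤ f x) →
    arec cs (rcf f xs)
      = ((bf (fun x => (xs.count x : Int)) cs f).1,
         rcf (bf (fun x => (xs.count x : Int)) cs f).2 xs) := by
  induction cs with
  | nil => intro f hf; rfl
  | cons c cs ih =>
    intro f hf
    have hmem := mem_rcf c xs f hf
    by_cases h : f c < (xs.count c : Int)
    · have hc : (rcf f xs).contains c = true := by
        simpa using hmem.mpr h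
      simp only [arec, bf, hc, if_pos h, if_true]
      rw [← erase_rcf c xs f hf h]
      rw [ih (updF f c (f c + 1))
        (fun y => by
          have h2 := hf y; have h3 := hf c
          simp only [updF]; split_ifs <;> omega)]
    · have hc : (rcf f xs).contains c = false := by
        simp only [List.contains_eq_mem, decide_eq_false_iff_not]
        exact fun hm => h (hmem.mp hm)
      simp only [arec, bf, hc, if_neg h, Bool.false_eq_true, if_false]
      exact ih f hf

-- index/pop on the first occurrence
lemma popFirst (s : List String) (c : String) : c ∈ s →
    ∃ k : Nat, PySem.List.index? s c = some k ∧ PySem.List.pop? s (k : Int) = some (c, s.erase c) := by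
  induction s with
  | nil => intro h; cases h
  | cons a s ih =>
    intro h
    by_cases hac : a = c
    · subst hac
      exact ⟨0, PySem.List.index?_cons_self a s, by simp [PySem.List.pop?_zero_cons]⟩
    · have hcs : c ∈ s := List.mem_of_ne_of_mem (fun hh => hac hh.symm) h
      obtain ⟨k, hidx, hpop⟩ := ih hcs
      refine ⟨k + 1, ?_, ?_⟩
      · rw [PySem.List.index?_cons_of_ne s hac, hidx]; rfl
      · obtain ⟨hk, hget, _⟩ := PySem.List.getElem_of_index?_eq_some hidx
        have hk1 : k + 1 < (a :: s).length := by simp; exact hk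
        rw [PySem.List.pop?_natCast s k hk] at hpop
        have hpair := Option.some.inj hpop
        have h1 : s[k] = c := congrArg Prod.fst hpair
        have h2 : s.eraseIdx k = s.erase c := congrArg Prod.snd hpair
        rw [PySem.List.pop?_natCast (a :: s) (k + 1) hk1]
        simp only [List.getElem_cons_succ, List.eraseIdx_cons_succ]
        rw [List.erase_cons_tail (by simp [hac]), h1, h2]

-- port A's foldl = arec (accumulator bridge)
lemma foldA (cs : List String) : ∀ (acc s : List String),
    cs.foldl
      (fun (st : List String × List String) value =>
        if st.2.contains value then
          match PySem.List.index? st.2 value with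
          | some i =>
            match PySem.List.pop? st.2 (i : Int) with
            | some (x, rest) => (st.1 ++ [x], rest)
            | none => st
          | none => st
        else st)
      (acc, s)
      = (acc ++ (arec cs s).1, (arec cs s).2) := by
  induction cs with
  | nil => intro acc s; simp [arec]
  | cons c cs ih =>
    intro acc s
    by_cases hc : s.contains c
    · have hm : c ∈ s := by simpa using hc
      obtain ⟨k, hidx, hpop⟩ := popFirst s c hm
      simp only [List.foldl_cons, hc, if_true, hidx, hpop]
      rw [ih]
      simp [arec, hm]
    · have hm : c ∉ s := by simpa using hc
      simp only [List.foldl_cons, hc, Bool.false_eq_true, if_false]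
      rw [ih]
      simp [arec, hm]

-- port B's candidate foldl = bf (dict state read through getD)
lemma foldB (hav : PySem.Dict String Int) (cs : List String) :
    ∀ (acc : List String) (d : PySem.Dict String Int) (f : String → Int),
    (∀ x, d.getD x 0 = f x) →
    (cs.foldl
      (fun (st : List String × PySem.Dict String Int) v =>
        let w := st.2.getD v 0
        if w < hav.getD v 0 then (st.1 ++ [v], st.2.insert v (w + 1)) else st)
      (acc, d)).1
      = acc ++ (bf (fun x => hav.getD x 0) cs f).1
    ∧ ∀ x, (cs.foldl
      (fun (st : List String × PySem.Dict String Int) v =>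
        let w := st.2.getD v 0
        if w < hav.getD v 0 then (st.1 ++ [v], st.2.insert v (w + 1)) else st)
      (acc, d)).2.getD x 0 = (bf (fun x => hav.getD x 0) cs f).2 x := by
  induction cs with
  | nil => intro acc d f hdf; exact ⟨by simp [bf], by intro x; simpa [bf] using hdf x⟩
  | cons c cs ih =>
    intro acc d f hdf
    simp only [List.foldl_cons, bf, hdf c]
    split_ifs with h
    · have := ih (acc ++ [c]) (d.insert c (f c + 1)) (updF f c (f c + 1))
        (fun x => by
          rw [PySem.Dict.getD_insert]; simp only [updF]
          split_ifs with h2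
          · rfl
          · exact hdf x)
      exact ⟨by rw [this.1]; simp, this.2⟩
    · exact ih acc d f hdf

-- port B's source foldl = rcf (dict state read through getD)
lemma foldC (xs : List String) : ∀ (acc : List String) (d : PySem.Dict String Int) (f : String → Int),
    (∀ x, d.getD x 0 = f x) →
    (xs.foldl
      (fun (st : List String × PySem.Dict String Int) x =>
        let c := st.2.getD x 0
        if c > 0 then (st.1, st.2.insert x (c - 1)) else (st.1 ++ [x], st.2))
      (acc, d)).1
      = acc ++ rcf f xs := by
  induction xs with
  | nil => intro acc d f hdf; simp [rcf]
  | cons x xs ih =>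
    intro acc d f hdf
    simp only [List.foldl_cons, rcf, hdf x]
    split_ifs with h
    · rw [ih acc (d.insert x (f x - 1)) (updF f x (f x - 1))
        (fun y => by
          rw [PySem.Dict.getD_insert]; simp only [updF]
          split_ifs with h2
          · rfl
          · exact hdf y)]
    · rw [ih (acc ++ [x]) d f hdf]; simp

-- the first pass builds the counter of source
lemma havD (source : List String) (x : String) :
    (source.foldl (fun d x => d.insert x (d.getD x 0 + 1))
      (PySem.Dict.empty : PySem.Dict String Int)).getD x 0 = (source.count x : Int) := by
  rw [PySem.Dict.foldl_insert_getD_add_one_eq_counter, PySem.Dict.getD_counter]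

-- ===== VERDICT (by name: the statement is the Claim_ definition above) =====
theorem sortatomlist_spec : Claim_equal_sortatomlist := by
  intro source candidate _
  unfold Spec_sortatomlist sortatomlist sortatomlist_alt
  have hA := foldA candidate [] source
  simp only [List.nil_append] at hA
  rw [hA]
  have hav0 : ∀ x, (source.foldl (fun d x => d.insert x (d.getD x 0 + 1))
      (PySem.Dict.empty : PySem.Dict String Int)).getD x 0 = (source.count x : Int) := havD source
  have hB := foldB (source.foldl (fun d x => d.insert x (d.getD x 0 + 1)) PySem.Dict.empty) candidate [] PySem.Dict.empty (fun _ => 0)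
    (by intro x; simp [PySem.Dict.getD_empty])
  have hcongr : (bf (fun x => (source.foldl (fun d x => d.insert x (d.getD x 0 + 1))
      (PySem.Dict.empty : PySem.Dict String Int)).getD x 0) candidate (fun _ => 0))
      = bf (fun x => (source.count x : Int)) candidate (fun _ => 0) := by
    congr 1; funext x; exact hav0 x
  have hmain := arec_eq_bf source candidate (fun _ => 0) (fun _ => le_refl 0)
  rw [rcf_zero] at hmain
  rw [hmain]
  have hC := foldC source [] _ ((bf (fun x => (source.count x : Int)) candidate (fun _ => 0)).2)
    (by intro x; rw [hB.2 x, hcongr])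
  simp only [List.nil_append] at hB hC
  refine Prod.ext ?_ ?_
  · simp only
    rw [hB.1, hcongr]
  · simp only
    rw [hC]
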